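-- pv_equiv track=rewrite | github.com/sangjun19/CodingTest | 신입사원 교육.py | solution
-- ===== SOURCE A (Python) =====
-- import queue
--
-- def solution(ability, number):
--     pq = queue.PriorityQueue()
--
--     for n in ability:
--         pq.put(n)
--
--     for i in range(number):
--         x = pq.get()
--         y = pq.get()
--         pq.put(x + y)
--         pq.put(x + y)
--
--     result = 0
--     while not pq.empty():
--         result += pq.get()
--
--     return result
-- ===== SOURCE B (Python) =====
-- def solution(ability, number):
--     # Sorted-list strategy: sort once, then each round takes the two smallest
--     # from the front and re-inserts their sum (twice) at its ordered position.
--     lst = sorted(ability)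
--     for _ in range(number):
--         s = lst[0] + lst[1]
--         rest = lst[2:]
--         i = 0
--         while i < len(rest) and rest[i] <= s:
--             i += 1
--         lst = rest[:i] + [s, s] + rest[i:]
--     return sum(lst)
-- ===== Notes on version B (the rewrite author's own statement) =====
-- stated objective: alternative
-- what changed: Replaces the PriorityQueue (extract-min) with a single upfront sort plus ordered front-pops and positional re-insertion of the merged sum, and a plain sum() instead of draining the queue.
import Mathlib
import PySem

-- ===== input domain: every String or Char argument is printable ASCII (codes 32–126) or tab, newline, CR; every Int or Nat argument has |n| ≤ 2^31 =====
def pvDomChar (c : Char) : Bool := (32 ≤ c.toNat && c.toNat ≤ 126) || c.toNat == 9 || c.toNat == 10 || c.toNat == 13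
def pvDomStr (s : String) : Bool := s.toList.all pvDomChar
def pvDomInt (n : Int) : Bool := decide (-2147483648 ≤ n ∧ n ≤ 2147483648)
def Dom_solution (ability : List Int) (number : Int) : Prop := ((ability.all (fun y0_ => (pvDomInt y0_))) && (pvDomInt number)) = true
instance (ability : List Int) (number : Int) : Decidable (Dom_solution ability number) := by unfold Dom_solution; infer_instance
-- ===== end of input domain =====

-- B replaces A's priority queue by a sorted list with front pops and ordered re-insertion
-- (objective: alternative decomposition; return values proved equal on Pre_).

-- ===== PORT A =====
-- model of queue.PriorityQueue over Int: put = append, get = remove the minimum value.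
-- pq.get() on an empty queue BLOCKS in Python (never returns); that case is excluded by
-- Pre_solution, and the port returns (0, q) there only to stay total.
def pqGet (q : List Int) : Int × List Int :=
  match PySem.List.min? q (fun x => x) with
  | none => (0, q)
  | some m => (m, (PySem.List.remove? q m).getD q)

def aStep (q : List Int) : List Int :=
  let p1 := pqGet q
  let p2 := pqGet p1.2
  ((p2.2 ++ [p1.1 + p2.1]) ++ [p1.1 + p2.1])

-- the final 'while not pq.empty(): result += pq.get()' drain
def pqDrain (q : List Int) (acc : Int) : Int :=
  match h : PySem.List.min? q (fun x => x) with
  | none => acc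
  | some m => pqDrain ((PySem.List.remove? q m).getD q) (acc + m)
termination_by q.length
decreasing_by
  have hm : m ∈ q := PySem.List.min?_mem h
  rw [PySem.List.remove?_eq_some_erase q m hm]
  have h1 := List.length_erase_of_mem hm
  have h2 := List.length_pos_of_mem hm
  simp only [Option.getD_some]
  omega

def solution (ability : List Int) (number : Int) : Int :=
  let pq := ability.foldl (fun q n => q ++ [n]) []
  let pq := (PySem.List.pyRange 0 number 1).foldl (fun q _ => aStep q) pq
  pqDrain pq 0

-- ===== PORT B =====
-- the linear scan 'i = 0; while …' plus 'rest[:i] + [s, s] + rest[i:]' of Source B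
def insort2 (lst : List Int) (s : Int) : List Int :=
  match lst with
  | [] => [s, s]
  | h :: t => if h ≤ s then h :: insort2 t s else s :: s :: h :: t

def bStep (lst : List Int) : List Int :=
  match lst with
  | x :: y :: rest => insort2 rest (x + y)
  | _ => lst   -- Source B raises IndexError here; excluded by Pre_solution

def solution_alt (ability : List Int) (number : Int) : Int :=
  ((PySem.List.pyRange 0 number 1).foldl (fun l _ => bStep l) (PySem.List.sorted ability (fun x => x))).sum

-- ===== PRECONDITION & SPEC =====
-- With number ≥ 1 and fewer than two abilities, Python A blocks forever on pq.get()
-- (never returns), so those inputs are excluded.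
def Pre_solution (ability : List Int) (number : Int) : Prop :=
  number ≤ 0 ∨ 2 ≤ ability.length
instance (ability : List Int) (number : Int) : Decidable (Pre_solution ability number) := by
  unfold Pre_solution; infer_instance

def pvWitness_solution : List Int × Int := ([3, 1, 5], 2)

def Spec_solution (ability : List Int) (number : Int) (out : Int) : Prop := out = solution_alt ability number
instance (ability : List Int) (number : Int) (out : Int) : Decidable (Spec_solution ability number out) := by unfold Spec_solution; infer_instance

-- ===== CLAIM (what is proved, stated in full; the proofs are below) =====
def Claim_equal_solution : Prop := ∀ (ability : List Int) (number : Int), Dom_solution ability number → Pre_solution ability number → Spec_solution ability number (solution ability number)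

-- ===== LEMMAS AND PROOFS =====

theorem pqDrain_eq_sum_aux : ∀ (n : Nat) (q : List Int), q.length = n → ∀ acc, pqDrain q acc = acc + q.sum := by
  intro n
  induction n with
  | zero =>
    intro q hq acc
    have : q = [] := List.eq_nil_of_length_eq_zero hq
    subst this
    rw [pqDrain]
    simp [PySem.List.min?]
  | succ k ih =>
    intro q hq acc
    rw [pqDrain]
    split
    · next h => simp [(PySem.List.min?_eq_none_iff q _).mp h]
    · next m h =>
      have hm : m ∈ q := PySem.List.min?_mem h
      rw [PySem.List.remove?_eq_some_erase q m hm, Option.getD_some]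
      have hlen : (q.erase m).length = k := by
        have := List.length_erase_of_mem hm
        have := List.length_pos_of_mem hm
        omega
      rw [ih (q.erase m) hlen (acc + m), add_assoc, List.sum_erase hm]

theorem pqDrain_eq_sum (q : List Int) (acc : Int) : pqDrain q acc = acc + q.sum :=
  pqDrain_eq_sum_aux q.length q rfl acc

theorem min?_of_perm_sorted (q : List Int) (x : Int) (t : List Int)
    (hp : q.Perm (x :: t)) (hs : (x :: t).Pairwise (· ≤ ·)) :
    PySem.List.min? q (fun y => y) = some x := by
  have hq : q ≠ [] := by
    intro h; subst h; exact (List.cons_ne_nil x t) hp.nil_eq.symm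
  rcases hmo : PySem.List.min? q (fun y => y) with _ | m
  · exact absurd ((PySem.List.min?_eq_none_iff q _).mp hmo) hq
  · have hmem : m ∈ q := PySem.List.min?_mem hmo
    have hmin : ∀ y ∈ q, m ≤ y := by
      intro y hy; exact PySem.List.min?_isMin hmo y hy
    have hxq : x ∈ q := hp.mem_iff.mpr (by simp)
    have h1 : m ≤ x := hmin x hxq
    have h2 : x ≤ m := by
      have hm' : m ∈ x :: t := hp.mem_iff.mp hmem
      rcases List.mem_cons.mp hm' with h | h
      · omega
      · exact (List.pairwise_cons.mp hs).1 m h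
    have : m = x := le_antisymm h1 h2
    rw [this]

theorem pqGet_of_perm_sorted (q : List Int) (x : Int) (t : List Int)
    (hp : q.Perm (x :: t)) (hs : (x :: t).Pairwise (· ≤ ·)) :
    (pqGet q).1 = x ∧ (pqGet q).2.Perm t := by
  have hmo := min?_of_perm_sorted q x t hp hs
  have hxq : x ∈ q := hp.mem_iff.mpr (by simp)
  constructor
  · simp [pqGet, hmo]
  · simp only [pqGet, hmo, PySem.List.remove?_eq_some_erase q x hxq, Option.getD_some]
    have := hp.erase x
    simpa using this

theorem mem_insort2 (t : List Int) (s y : Int) (hy : y ∈ insort2 t s) : y = s ∨ y ∈ t := by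
  induction t with
  | nil => simp [insort2] at hy; tauto
  | cons h tl ih =>
    simp only [insort2] at hy
    split at hy
    · rcases List.mem_cons.mp hy with h1 | h1
      · right; simp [h1]
      · rcases ih h1 with h2 | h2
        · exact Or.inl h2
        · right; simp [h2]
    · simp only [List.mem_cons] at hy ⊢
      tauto

theorem insort2_perm (t : List Int) (s : Int) : (insort2 t s).Perm (s :: s :: t) := by
  induction t with
  | nil => simp [insort2]
  | cons h tl ih =>
    simp only [insort2]
    split
    · exact (ih.cons h).trans ((List.Perm.swap s h (s :: tl)).trans ((List.Perm.swap s h tl).cons s))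
    · exact List.Perm.refl _

theorem insort2_pairwise (t : List Int) (s : Int) (hs : t.Pairwise (· ≤ ·)) :
    (insort2 t s).Pairwise (· ≤ ·) := by
  induction t with
  | nil => simp [insort2]
  | cons h tl ih =>
    rcases List.pairwise_cons.mp hs with ⟨hall, htl⟩
    simp only [insort2]
    split
    · next hle =>
      refine List.pairwise_cons.mpr ⟨?_, ih htl⟩
      intro y hy
      rcases mem_insort2 tl s y hy with h1 | h1
      · omega
      · exact hall y h1
    · next hgt =>
      have hsh : s ≤ h := by omega
      refine List.pairwise_cons.mpr ⟨?_, List.pairwise_cons.mpr ⟨?_, hs⟩⟩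
      · intro y hy
        rcases List.mem_cons.mp hy with h1 | h1
        · omega
        · rcases List.mem_cons.mp h1 with h2 | h2
          · omega
          · have := hall y h2; omega
      · intro y hy
        rcases List.mem_cons.mp hy with h1 | h1
        · omega
        · have := hall y h1; omega

theorem append2_perm (l : List Int) (v : Int) : (l ++ [v] ++ [v]).Perm (v :: v :: l) := by
  simp [List.perm_iff_count, List.count_append, List.count_cons]
  intro b; omega

theorem step_inv (q l : List Int) (hp : q.Perm l) (hs : l.Pairwise (· ≤ ·)) (hl : 2 ≤ l.length) :
    (aStep q).Perm (bStep l) ∧ (bStep l).Pairwise (· ≤ ·) ∧ 2 ≤ (bStep l).length := by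
  rcases l with _ | ⟨x, _ | ⟨y, rest⟩⟩
  · simp at hl
  · simp at hl
  · have h1 := pqGet_of_perm_sorted q x (y :: rest) hp hs
    have hs2 : (y :: rest).Pairwise (· ≤ ·) := (List.pairwise_cons.mp hs).2
    have h2 := pqGet_of_perm_sorted ((pqGet q).2) y rest h1.2 hs2
    have hperm : (aStep q).Perm ((x + y) :: (x + y) :: rest) := by
      simp only [aStep, h1.1, h2.1]
      exact (append2_perm _ _).trans (((h2.2).cons _).cons _)
    refine ⟨hperm.trans ?_, ?_, ?_⟩
    · simpa [bStep] using (insort2_perm rest (x + y)).symm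
    · simpa [bStep] using insort2_pairwise rest (x + y) (List.pairwise_cons.mp hs2).2
    · have hle := (insort2_perm rest (x + y)).length_eq
      simp only [List.length_cons] at hle
      simp only [bStep, hle]
      omega

theorem foldl_inv (is : List Int) (q l : List Int) (hp : q.Perm l)
    (hs : l.Pairwise (· ≤ ·)) (hl : 2 ≤ l.length) :
    (is.foldl (fun q _ => aStep q) q).Perm (is.foldl (fun l _ => bStep l) l) ∧
    (is.foldl (fun l _ => bStep l) l).Pairwise (· ≤ ·) ∧
    2 ≤ (is.foldl (fun l _ => bStep l) l).length := by
  induction is generalizing q l with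
  | nil => exact ⟨hp, hs, hl⟩
  | cons i it ih =>
    obtain ⟨h1, h2, h3⟩ := step_inv q l hp hs hl
    simpa using ih (aStep q) (bStep l) h1 h2 h3

theorem build_eq (ability : List Int) : ability.foldl (fun q n => q ++ [n]) [] = ability := by
  have h : ∀ (xs acc : List Int), xs.foldl (fun q n => q ++ [n]) acc = acc ++ xs := by
    intro xs
    induction xs with
    | nil => simp
    | cons a t ih => intro acc; simp [List.foldl_cons, ih]
  simpa using h ability []

-- ===== VERDICT (by name: the statement is the Claim_ definition above) =====
theorem solution_spec : Claim_equal_solution := by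
  intro ability number _ hpre
  unfold Spec_solution solution solution_alt
  rw [build_eq]
  have hperm0 : ability.Perm (PySem.List.sorted ability (fun x => x)) :=
    (PySem.List.sorted_perm ability (fun x => x) false).symm
  have hsorted0 : (PySem.List.sorted ability (fun x => x)).Pairwise (· ≤ ·) :=
    PySem.List.sorted_pairwise ability (fun x => x)
  rcases hpre with hn | hlen
  · rw [PySem.List.pyRange_one_eq_nil hn]
    simpa [pqDrain_eq_sum] using hperm0.sum_eq
  · have hl : 2 ≤ (PySem.List.sorted ability (fun x => x)).length := by
      rw [PySem.List.length_sorted]; exact hlen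
    obtain ⟨h1, _, _⟩ := foldl_inv (PySem.List.pyRange 0 number 1) ability
      (PySem.List.sorted ability (fun x => x)) hperm0 hsorted0 hl
    simpa [pqDrain_eq_sum] using h1.sum_eq
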